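-- pv_equiv track=rewrite | github.com/dotjax/zenura | modules/language/algorithms/clusterer.py | generalize
-- ===== SOURCE A (Python) =====
-- def generalize(memory, byte_tolerance=2, delta_tolerance=2, xor_tolerance=2):
--     """
--     Optimized function to generalize memory by clustering patterns.
--     """
--     # Step 1: Group all patterns into clusters to avoid redundant comparisons.
--     clusters = {}
--
--     # Use the tolerances to define the 'bin' size for clustering.
--     # A larger tolerance creates larger, broader bins.
--     byte_bin = byte_tolerance * 2 + 1
--     delta_bin = delta_tolerance * 2 + 1
--     xor_bin = xor_tolerance * 2 + 1
--
--     for pattern in memory.keys():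
--         # Assign each pattern to a cluster key based on its binned values.
--         cluster_key = (
--             round(pattern[0] / byte_bin),
--             round(pattern[1] / delta_bin),
--             round(pattern[2] / xor_bin)
--         )
--         if cluster_key not in clusters:
--             clusters[cluster_key] = []
--         clusters[cluster_key].append(pattern)
--
--     # Step 2: Process each cluster to create the generalized memory.
--     generalized = {}
--     for cluster_key, patterns_in_cluster in clusters.items():
--         # For each pattern in the cluster, merge its outcomes into a single dict.
--         merged_outcomes = {}
--         for pattern in patterns_in_cluster:
--             for pred, count in memory[pattern].items():
--                 merged_outcomes[pred] = merged_outcomes.get(pred, 0) + count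
--
--         # Use a representative pattern from the cluster as the new key.
--         # Here, we just use the first one.
--         representative_pattern = patterns_in_cluster[0]
--         generalized[representative_pattern] = merged_outcomes
--
--     return generalized
-- ===== SOURCE B (Python) =====
-- def generalize(memory, byte_tolerance=2, delta_tolerance=2, xor_tolerance=2):
--     """Single-pass re-implementation: one dict keyed by the binned cluster key
--     holding (representative pattern, running merged outcomes)."""
--     byte_bin = byte_tolerance * 2 + 1
--     delta_bin = delta_tolerance * 2 + 1
--     xor_bin = xor_tolerance * 2 + 1
--     acc = {}
--     for pattern, outcomes in memory.items():
--         key = (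
--             round(pattern[0] / byte_bin),
--             round(pattern[1] / delta_bin),
--             round(pattern[2] / xor_bin),
--         )
--         rep, merged = acc.get(key, (pattern, {}))
--         for pred, count in outcomes.items():
--             merged[pred] = merged.get(pred, 0) + count
--         acc[key] = (rep, merged)
--     return dict(acc.values())
-- ===== Notes on version B (the rewrite author's own statement) =====
-- stated objective: alternative
-- what changed: Replaces A's two-phase structure (first group all patterns into a cluster-key -> pattern-list dict, then a second pass re-looking up memory[pattern] to merge outcomes per cluster) with a single fused pass that keeps one dict from cluster key to (representative pattern, running merged-outcomes dict), eliminating the intermediate pattern-list index and the repeated memory lookups.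
import Mathlib
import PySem

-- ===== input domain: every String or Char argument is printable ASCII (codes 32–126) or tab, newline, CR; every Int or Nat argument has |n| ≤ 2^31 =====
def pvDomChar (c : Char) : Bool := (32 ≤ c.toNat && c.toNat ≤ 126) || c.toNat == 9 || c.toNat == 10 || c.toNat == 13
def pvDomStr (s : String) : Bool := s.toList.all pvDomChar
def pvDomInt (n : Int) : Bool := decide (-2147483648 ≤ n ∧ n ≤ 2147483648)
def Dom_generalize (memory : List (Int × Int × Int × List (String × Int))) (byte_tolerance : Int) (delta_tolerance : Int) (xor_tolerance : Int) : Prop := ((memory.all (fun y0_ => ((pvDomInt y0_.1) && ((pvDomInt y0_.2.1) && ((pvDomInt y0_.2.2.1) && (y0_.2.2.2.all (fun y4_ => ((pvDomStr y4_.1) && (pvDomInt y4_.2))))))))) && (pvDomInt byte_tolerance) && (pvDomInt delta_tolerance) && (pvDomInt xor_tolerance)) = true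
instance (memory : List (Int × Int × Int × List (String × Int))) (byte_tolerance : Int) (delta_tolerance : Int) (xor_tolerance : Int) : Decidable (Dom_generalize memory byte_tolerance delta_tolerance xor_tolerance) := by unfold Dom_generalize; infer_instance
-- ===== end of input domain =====

-- B fuses A's two passes into one pass that accumulates (representative, merged outcomes)
-- per binned cluster key; equal return value (this file proves it); no speed claim ("alternative").

-- ===== PORT A =====

-- round(n / d) for ODD d, as an exact integer computation: with d odd the quotient is never
-- an exact half, so round-half-to-even is plain nearest-integer; on the stated domain
-- (|n|, |tolerance| ≤ 2^31) the float quotient rounds to the same nearest integer.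
def pyRoundDiv (n d : Int) : Int :=
  if d < 0 then PySem.Int.floordiv (2 * (-n) + (-d)) (2 * (-d))
  else PySem.Int.floordiv (2 * n + d) (2 * d)

-- the tuple (round(pattern[0]/byte_bin), round(pattern[1]/delta_bin), round(pattern[2]/xor_bin))
def clusterKey (bb db xb : Int) (p : Int × Int × Int) : Int × Int × Int :=
  (pyRoundDiv p.1 bb, pyRoundDiv p.2.1 db, pyRoundDiv p.2.2 xb)

-- memory[pattern]: dict lookup = first match; the [] branch is unreachable in A
-- (every looked-up pattern comes from memory's keys)
def memLookup (memory : List (Int × Int × Int × List (String × Int))) (p : Int × Int × Int) :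
    List (String × Int) :=
  match memory.find? (fun e => (e.1, e.2.1, e.2.2.1) == p) with
  | some e => e.2.2.2
  | none => []

-- 'for pred, count in outs: merged[pred] = merged.get(pred, 0) + count'
-- (this inner loop is the same line of Python in A and in B)
def mergeOutcomes (m : PySem.Dict String Int) (outs : List (String × Int)) : PySem.Dict String Int :=
  outs.foldl (fun m pc => m.modify pc.1 0 (· + pc.2)) m

def generalize (memory : List (Int × Int × Int × List (String × Int))) (byte_tolerance : Int) (delta_tolerance : Int) (xor_tolerance : Int) : List (Int × Int × Int × List (String × Int)) :=
  let byte_bin := byte_tolerance * 2 + 1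
  let delta_bin := delta_tolerance * 2 + 1
  let xor_bin := xor_tolerance * 2 + 1
  -- Step 1: 'if cluster_key not in clusters: clusters[cluster_key] = []; append'
  -- is modify with default []
  let clusters : PySem.Dict (Int × Int × Int) (List (Int × Int × Int)) :=
    memory.foldl (fun c e =>
      c.modify (clusterKey byte_bin delta_bin xor_bin (e.1, e.2.1, e.2.2.1)) []
        (· ++ [(e.1, e.2.1, e.2.2.1)])) PySem.Dict.empty
  -- Step 2: patterns_in_cluster[0] = headD (cluster lists are nonempty by construction)
  let generalized : PySem.Dict (Int × Int × Int) (PySem.Dict String Int) :=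
    clusters.items.foldl (fun g kv =>
      g.insert (kv.2.headD (0, 0, 0))
        (kv.2.foldl (fun m p => mergeOutcomes m (memLookup memory p)) PySem.Dict.empty))
      PySem.Dict.empty
  generalized.items.map (fun pm => (pm.1.1, pm.1.2.1, pm.1.2.2, pm.2.items))

-- ===== PORT B =====

def generalize_alt (memory : List (Int × Int × Int × List (String × Int))) (byte_tolerance : Int) (delta_tolerance : Int) (xor_tolerance : Int) : List (Int × Int × Int × List (String × Int)) :=
  let byte_bin := byte_tolerance * 2 + 1
  let delta_bin := delta_tolerance * 2 + 1
  let xor_bin := xor_tolerance * 2 + 1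
  -- single pass: acc[key] = (representative, running merged outcomes)
  let acc : PySem.Dict (Int × Int × Int) ((Int × Int × Int) × PySem.Dict String Int) :=
    memory.foldl (fun acc e =>
      let key := clusterKey byte_bin delta_bin xor_bin (e.1, e.2.1, e.2.2.1)
      let rm := acc.getD key ((e.1, e.2.1, e.2.2.1), PySem.Dict.empty)
      acc.insert key (rm.1, mergeOutcomes rm.2 e.2.2.2)) PySem.Dict.empty
  -- return dict(acc.values())
  (PySem.Dict.ofList acc.values).items.map (fun pm => (pm.1.1, pm.1.2.1, pm.1.2.2, pm.2.items))

-- ===== PRECONDITION & SPEC =====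
-- Pre_ excludes association lists whose pattern keys repeat: such a list does not arise from a
-- Python dict (dict construction collapses duplicates), and on it the two ports read the
-- duplicate entries differently; both real Python functions receive a dict and agree there.
def Pre_generalize (memory : List (Int × Int × Int × List (String × Int))) (byte_tolerance : Int) (delta_tolerance : Int) (xor_tolerance : Int) : Prop :=
  (memory.map (fun e => (e.1, e.2.1, e.2.2.1))).Nodup
instance (memory : List (Int × Int × Int × List (String × Int))) (byte_tolerance : Int) (delta_tolerance : Int) (xor_tolerance : Int) : Decidable (Pre_generalize memory byte_tolerance delta_tolerance xor_tolerance) := by unfold Pre_generalize; infer_instance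

def pvWitness_generalize : (List (Int × Int × Int × List (String × Int))) × Int × Int × Int :=
  ([(0, 0, 0, [("a", 1)]), (10, 0, 0, [("a", 2)])], 2, 2, 2)

def Spec_generalize (memory : List (Int × Int × Int × List (String × Int))) (byte_tolerance : Int) (delta_tolerance : Int) (xor_tolerance : Int) (out : List (Int × Int × Int × List (String × Int))) : Prop := out = generalize_alt memory byte_tolerance delta_tolerance xor_tolerance
instance (memory : List (Int × Int × Int × List (String × Int))) (byte_tolerance : Int) (delta_tolerance : Int) (xor_tolerance : Int) (out : List (Int × Int × Int × List (String × Int))) : Decidable (Spec_generalize memory byte_tolerance delta_tolerance xor_tolerance out) := by unfold Spec_generalize; infer_instance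

-- ===== CLAIM (what is proved, stated in full; the proofs are below) =====
def Claim_equal_generalize : Prop := ∀ (memory : List (Int × Int × Int × List (String × Int))) (byte_tolerance : Int) (delta_tolerance : Int) (xor_tolerance : Int), Dom_generalize memory byte_tolerance delta_tolerance xor_tolerance → Pre_generalize memory byte_tolerance delta_tolerance xor_tolerance → Spec_generalize memory byte_tolerance delta_tolerance xor_tolerance (generalize memory byte_tolerance delta_tolerance xor_tolerance)

-- ===== LEMMAS AND PROOFS =====

-- abbreviations for the two loop states (proof-only)
def pvPat (e : Int × Int × Int × List (String × Int)) : Int × Int × Int := (e.1, e.2.1, e.2.2.1)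

def pvClusters (K : (Int × Int × Int) → (Int × Int × Int))
    (l : List (Int × Int × Int × List (String × Int))) :
    PySem.Dict (Int × Int × Int) (List (Int × Int × Int)) :=
  l.foldl (fun c e => c.modify (K (pvPat e)) [] (· ++ [pvPat e])) PySem.Dict.empty

def pvMerged (l : List (Int × Int × Int × List (String × Int))) (ps : List (Int × Int × Int)) :
    PySem.Dict String Int :=
  ps.foldl (fun m p => mergeOutcomes m (memLookup l p)) PySem.Dict.empty

def pvAcc (K : (Int × Int × Int) → (Int × Int × Int))
    (l : List (Int × Int × Int × List (String × Int))) :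
    PySem.Dict (Int × Int × Int) ((Int × Int × Int) × PySem.Dict String Int) :=
  l.foldl (fun acc e =>
    let key := K (pvPat e)
    let rm := acc.getD key (pvPat e, PySem.Dict.empty)
    acc.insert key (rm.1, mergeOutcomes rm.2 e.2.2.2)) PySem.Dict.empty

def pvF (l : List (Int × Int × Int × List (String × Int)))
    (kv : (Int × Int × Int) × List (Int × Int × Int)) :
    (Int × Int × Int) × ((Int × Int × Int) × PySem.Dict String Int) :=
  (kv.1, (kv.2.headD (0, 0, 0), pvMerged l kv.2))

-- the induction invariant
def pvInv (K : (Int × Int × Int) → (Int × Int × Int))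
    (l : List (Int × Int × Int × List (String × Int))) : Prop :=
  (pvAcc K l).items = (pvClusters K l).items.map (pvF l)
  ∧ (∀ kv ∈ (pvClusters K l).items, kv.2 ≠ [] ∧ ∀ p ∈ kv.2, K p = kv.1 ∧ p ∈ l.map pvPat)

theorem pv_headD_mem {α : Type} (xs : List α) (d : α) (h : xs ≠ []) : xs.headD d ∈ xs := by
  cases xs with
  | nil => exact absurd rfl h
  | cons x t => simp

theorem pv_lookup_append_of_mem (l : List (Int × Int × Int × List (String × Int)))
    (e : Int × Int × Int × List (String × Int)) (p : Int × Int × Int)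
    (h : p ∈ l.map pvPat) : memLookup (l ++ [e]) p = memLookup l p := by
  obtain ⟨x, hx, hpx⟩ := List.mem_map.mp h
  have hs : (l.find? (fun e => (e.1, e.2.1, e.2.2.1) == p)).isSome := by
    rw [List.find?_isSome]
    exact ⟨x, hx, by simp [pvPat] at hpx; simp [← hpx]⟩
  obtain ⟨y, hy⟩ := Option.isSome_iff_exists.mp hs
  simp [memLookup, List.find?_append, hy]

theorem pv_lookup_append_self (l : List (Int × Int × Int × List (String × Int)))
    (e : Int × Int × Int × List (String × Int))
    (h : pvPat e ∉ l.map pvPat) : memLookup (l ++ [e]) (pvPat e) = e.2.2.2 := by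
  have hn : l.find? (fun x => (x.1, x.2.1, x.2.2.1) == (e.1, e.2.1, e.2.2.1)) = none := by
    rw [List.find?_eq_none]
    intro x hx
    simp only [beq_iff_eq]
    intro hcontra
    exact h (List.mem_map.mpr ⟨x, hx, by simp [pvPat, hcontra]⟩)
  simp [memLookup, List.find?_append, pvPat, hn]

theorem pv_merged_append (l : List (Int × Int × Int × List (String × Int)))
    (e : Int × Int × Int × List (String × Int)) (ps : List (Int × Int × Int))
    (h : ∀ p ∈ ps, p ∈ l.map pvPat) : pvMerged (l ++ [e]) ps = pvMerged l ps := by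
  unfold pvMerged
  induction ps using List.reverseRecOn with
  | nil => rfl
  | append_singleton ps q ih =>
    rw [List.foldl_append, List.foldl_append, ih (fun p hp => h p (by simp [hp]))]
    simp only [List.foldl_cons, List.foldl_nil]
    rw [pv_lookup_append_of_mem l e q (h q (by simp))]

theorem pv_modify_eq_insert {κ ν : Type} [BEq κ] (d : PySem.Dict κ ν) (k : κ) (d0 : ν)
    (f : ν → ν) : d.modify k d0 f = d.insert k (f (d.getD k d0)) := rfl

theorem pv_ofList_eq {κ ν : Type} [BEq κ] (l : List (κ × ν)) :
    PySem.Dict.ofList l = l.foldl (fun d p => d.insert p.1 p.2) PySem.Dict.empty := rfl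

theorem pv_clusters_append (K : (Int × Int × Int) → (Int × Int × Int))
    (l : List (Int × Int × Int × List (String × Int)))
    (e : Int × Int × Int × List (String × Int)) :
    pvClusters K (l ++ [e])
      = (pvClusters K l).modify (K (pvPat e)) [] (· ++ [pvPat e]) := by
  simp [pvClusters, List.foldl_append]

theorem pv_acc_append (K : (Int × Int × Int) → (Int × Int × Int))
    (l : List (Int × Int × Int × List (String × Int)))
    (e : Int × Int × Int × List (String × Int)) :
    pvAcc K (l ++ [e])
      = (pvAcc K l).insert (K (pvPat e))
          (((pvAcc K l).getD (K (pvPat e)) (pvPat e, PySem.Dict.empty)).1,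
            mergeOutcomes ((pvAcc K l).getD (K (pvPat e)) (pvPat e, PySem.Dict.empty)).2 e.2.2.2) := by
  simp [pvAcc, List.foldl_append]

theorem pv_nodup_keys_clusters (K : (Int × Int × Int) → (Int × Int × Int))
    (l : List (Int × Int × Int × List (String × Int))) : (pvClusters K l).keys.Nodup := by
  exact PySem.Dict.nodup_keys_foldl_modify_key l (fun e => K (pvPat e)) []
    (fun c e => (· ++ [pvPat e])) PySem.Dict.empty (by simp)

theorem pv_inv_holds (K : (Int × Int × Int) → (Int × Int × Int)) :
    ∀ l : List (Int × Int × Int × List (String × Int)), (l.map pvPat).Nodup → pvInv K l := by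
  intro l
  induction l using List.reverseRecOn with
  | nil =>
    intro _
    constructor
    · rfl
    · intro kv hkv
      simp [pvClusters, PySem.Dict.empty] at hkv
  | append_singleton l e ih =>
    intro h
    rw [List.map_append, List.nodup_append] at h
    obtain ⟨hnd, _, hdisj⟩ := h
    have hfresh : pvPat e ∉ l.map pvPat := fun hmem => hdisj _ hmem (pvPat e) (by simp) rfl
    obtain ⟨hitems, hmem⟩ := ih hnd
    have hck : (pvClusters K l).keys.Nodup := pv_nodup_keys_clusters K l
    have hkeys : (pvAcc K l).keys = (pvClusters K l).keys := by
      simp [PySem.Dict.keys, hitems, pvF]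
    have hak : (pvAcc K l).keys.Nodup := hkeys ▸ hck
    have hcont : (pvAcc K l).contains (K (pvPat e)) = (pvClusters K l).contains (K (pvPat e)) := by
      simp [PySem.Dict.contains_eq_decide_mem_keys, hkeys]
    constructor
    · -- items equation
      rw [pv_clusters_append, pv_acc_append, pv_modify_eq_insert]
      by_cases hc : (pvClusters K l).contains (K (pvPat e)) = true
      · rw [PySem.Dict.items_insert_of_contains _ _ (hcont.trans hc),
          PySem.Dict.items_insert_of_contains _ _ hc, hitems, List.map_map, List.map_map]
        apply List.map_congr_left
        intro kv hkv
        obtain ⟨hne, hmems⟩ := hmem kv hkv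
        have hsub : ∀ p ∈ kv.2, p ∈ l.map pvPat := fun p hp => (hmems p hp).2
        by_cases hk : kv.1 = K (pvPat e)
        · have hgetc : (pvClusters K l).getD (K (pvPat e)) [] = kv.2 := by
            have := PySem.Dict.getD_of_mem_items (pvClusters K l) (k := kv.1) (v := kv.2)
              (by simpa using hkv) hck ([] : List (Int × Int × Int))
            rwa [hk] at this
          have hin : (kv.1, (kv.2.headD (0, 0, 0), pvMerged l kv.2)) ∈ (pvAcc K l).items := by
            rw [hitems]
            exact List.mem_map.mpr ⟨kv, hkv, rfl⟩
          rw [hk] at hin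
          have hgeta : (pvAcc K l).getD (K (pvPat e)) (pvPat e, PySem.Dict.empty)
              = (kv.2.headD (0, 0, 0), pvMerged l kv.2) :=
            PySem.Dict.getD_of_mem_items (pvAcc K l) hin hak (pvPat e, PySem.Dict.empty)
          have hmerged : pvMerged (l ++ [e]) (kv.2 ++ [pvPat e])
              = mergeOutcomes (pvMerged l kv.2) e.2.2.2 := by
            unfold pvMerged
            rw [List.foldl_append]
            have h1 : (kv.2.foldl (fun m p => mergeOutcomes m (memLookup (l ++ [e]) p))
                PySem.Dict.empty) = pvMerged l kv.2 := pv_merged_append l e kv.2 hsub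
            simp only [List.foldl_cons, List.foldl_nil, h1,
              pv_lookup_append_self l e hfresh]
            rfl
          obtain ⟨x, xs, hx⟩ := List.exists_cons_of_ne_nil hne
          rw [hx] at hgetc hgeta hmerged
          simp [pvF, hk, hgetc, hgeta, hx]
          exact hmerged.symm
        · simp [pvF, hk, pv_merged_append l e kv.2 hsub]
      · have hc' : (pvClusters K l).contains (K (pvPat e)) = false := by
          simpa using hc
        have ha' : (pvAcc K l).contains (K (pvPat e)) = false := hcont.trans hc'
        rw [PySem.Dict.items_insert_of_not_contains _ _ ha',
          PySem.Dict.items_insert_of_not_contains _ _ hc',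
          PySem.Dict.getD_of_not_contains _ _ ha',
          PySem.Dict.getD_of_not_contains _ _ hc',
          hitems, List.map_append]
        congr 1
        · apply List.map_congr_left
          intro kv hkv
          obtain ⟨hne, hmems⟩ := hmem kv hkv
          have hsub : ∀ p ∈ kv.2, p ∈ l.map pvPat := fun p hp => (hmems p hp).2
          simp [pvF, pv_merged_append l e kv.2 hsub]
        · have hone : pvMerged (l ++ [e]) [pvPat e]
              = mergeOutcomes PySem.Dict.empty e.2.2.2 := by
            unfold pvMerged
            simp only [List.foldl_cons, List.foldl_nil,
              pv_lookup_append_self l e hfresh]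
          simp [pvF, hone]
    · -- membership invariant
      intro kv hkv
      rw [pv_clusters_append, pv_modify_eq_insert] at hkv
      by_cases hc : (pvClusters K l).contains (K (pvPat e)) = true
      · rw [PySem.Dict.items_insert_of_contains _ _ hc] at hkv
        obtain ⟨kv0, hkv0, hkveq⟩ := List.mem_map.mp hkv
        obtain ⟨hne0, hmems0⟩ := hmem kv0 hkv0
        by_cases hk : (kv0.1 == K (pvPat e)) = true
        · rw [if_pos hk] at hkveq
          have hgetc : (pvClusters K l).getD (K (pvPat e)) [] = kv0.2 := by
            have := PySem.Dict.getD_of_mem_items (pvClusters K l) (k := kv0.1) (v := kv0.2)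
              (by simpa using hkv0) hck ([] : List (Int × Int × Int))
            rwa [beq_iff_eq.mp hk] at this
          subst hkveq
          refine ⟨by simp [hgetc], ?_⟩
          intro p hp
          rw [hgetc] at hp
          rcases List.mem_append.mp hp with hp | hp
          · obtain ⟨hKp, hmemp⟩ := hmems0 p hp
            exact ⟨by rw [hKp, beq_iff_eq.mp hk], by simp [hmemp]⟩
          · simp only [List.mem_singleton] at hp
            subst hp
            exact ⟨rfl, by simp⟩
        · rw [if_neg (by simpa using hk)] at hkveq
          subst hkveq
          exact ⟨hne0, fun p hp => ⟨(hmems0 p hp).1, by simp [(hmems0 p hp).2]⟩⟩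
      · have hc' : (pvClusters K l).contains (K (pvPat e)) = false := by simpa using hc
        rw [PySem.Dict.items_insert_of_not_contains _ _ hc',
          PySem.Dict.getD_of_not_contains _ _ hc'] at hkv
        rcases List.mem_append.mp hkv with hkv | hkv
        · obtain ⟨hne0, hmems0⟩ := hmem kv hkv
          exact ⟨hne0, fun p hp => ⟨(hmems0 p hp).1, by simp [(hmems0 p hp).2]⟩⟩
        · simp only [List.mem_singleton] at hkv
          subst hkv
          refine ⟨by simp, ?_⟩
          intro p hp
          simp only [List.nil_append, List.mem_singleton] at hp
          subst hp
          exact ⟨rfl, by simp⟩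

theorem pv_heads_nodup (K : (Int × Int × Int) → (Int × Int × Int))
    (l : List (Int × Int × Int × List (String × Int))) (h : (l.map pvPat).Nodup) :
    ((pvClusters K l).items.map (fun kv => kv.2.headD (0, 0, 0))).Nodup := by
  obtain ⟨_, hmem⟩ := pv_inv_holds K l h
  have hck : ((pvClusters K l).items.map (fun kv => kv.1)).Nodup := by
    simpa [PySem.Dict.keys] using pv_nodup_keys_clusters K l
  have hmapK : ((pvClusters K l).items.map (fun kv => kv.2.headD (0, 0, 0))).map K
      = (pvClusters K l).items.map (fun kv => kv.1) := by
    rw [List.map_map]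
    apply List.map_congr_left
    intro kv hkv
    obtain ⟨hne, hmems⟩ := hmem kv hkv
    exact (hmems _ (pv_headD_mem kv.2 (0, 0, 0) hne)).1
  exact List.Nodup.of_map K (hmapK ▸ hck)

-- ===== VERDICT (by name: the statement is the Claim_ definition above) =====
theorem generalize_spec : Claim_equal_generalize := by
  intro memory bt dt xt _ hpre
  unfold Spec_generalize
  have hpre' : (memory.map pvPat).Nodup := hpre
  obtain ⟨hitems, hmem⟩ :=
    pv_inv_holds (clusterKey (bt * 2 + 1) (dt * 2 + 1) (xt * 2 + 1)) memory hpre'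
  have hheads := pv_heads_nodup (clusterKey (bt * 2 + 1) (dt * 2 + 1) (xt * 2 + 1)) memory hpre'
  have hA : generalize memory bt dt xt
      = (((pvClusters (clusterKey (bt * 2 + 1) (dt * 2 + 1) (xt * 2 + 1)) memory).items.foldl
            (fun g kv => g.insert (kv.2.headD (0, 0, 0)) (pvMerged memory kv.2))
            PySem.Dict.empty).items).map
          (fun pm => (pm.1.1, pm.1.2.1, pm.1.2.2, pm.2.items)) := rfl
  have hB : generalize_alt memory bt dt xt
      = ((PySem.Dict.ofList
            (pvAcc (clusterKey (bt * 2 + 1) (dt * 2 + 1) (xt * 2 + 1)) memory).values).items).map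
          (fun pm => (pm.1.1, pm.1.2.1, pm.1.2.2, pm.2.items)) := rfl
  have hvals : (pvAcc (clusterKey (bt * 2 + 1) (dt * 2 + 1) (xt * 2 + 1)) memory).values
      = (pvClusters (clusterKey (bt * 2 + 1) (dt * 2 + 1) (xt * 2 + 1)) memory).items.map
          (fun kv => (kv.2.headD (0, 0, 0), pvMerged memory kv.2)) := by
    show (pvAcc (clusterKey (bt * 2 + 1) (dt * 2 + 1) (xt * 2 + 1)) memory).items.map (·.2) = _
    rw [hitems, List.map_map]
    rfl
  have hvnodup : (((pvAcc (clusterKey (bt * 2 + 1) (dt * 2 + 1) (xt * 2 + 1)) memory).values).map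
      (fun p => p.1)).Nodup := by
    rw [hvals, List.map_map]
    simpa using hheads
  rw [hA, hB, pv_ofList_eq,
    PySem.Dict.items_foldl_insert_fresh
      (pvClusters (clusterKey (bt * 2 + 1) (dt * 2 + 1) (xt * 2 + 1)) memory).items
      (fun kv => kv.2.headD (0, 0, 0)) (fun kv => pvMerged memory kv.2) PySem.Dict.empty
      (fun a _ => PySem.Dict.contains_empty _) hheads,
    PySem.Dict.items_foldl_insert_fresh
      (pvAcc (clusterKey (bt * 2 + 1) (dt * 2 + 1) (xt * 2 + 1)) memory).values
      (fun p => p.1) (fun p => p.2) PySem.Dict.empty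
      (fun a _ => PySem.Dict.contains_empty _) hvnodup,
    hvals]
  simp [List.map_map]
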